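-- pv_equiv track=rewrite | github.com/hqr1688/mcp-device-gateway | src/mcp_device_gateway/security.py | _match_windows_segment_command
-- ===== SOURCE A (Python) =====
-- def _match_windows_segment_command(command: str, args: list[str]) -> str | None:
--     if command in {"shutdown", "restart-computer"}:
--         return "禁止主机关机或重启"
--     if command == "net" and len(args) >= 1 and args[0].lower() == "user":
--         return "禁止管理系统用户账户"
--     if command == "net" and len(args) >= 2 and args[0].lower() == "localgroup" and any(
--         arg.lower() == "/add" for arg in args[1:]
--     ):
--         return "禁止将用户添加到本地组（可用于提权）"
--     if command == "reg" and args and args[0].lower() in {"delete", "add", "import", "export"}: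
--         return "禁止修改或导出注册表"
--     if command == "vssadmin" and len(args) >= 2 and args[0].lower() == "delete" and args[1].lower() == "shadows":
--         return "禁止删除卷影副本（防范勒索软件）"
--     if command == "wmic" and "shadowcopy" in [arg.lower() for arg in args] and "delete" in [arg.lower() for arg in args]:
--         return "禁止通过 wmic 删除卷影副本（防范勒索软件）"
--     if command == "set-executionpolicy" and args and args[0].lower() in {"bypass", "unrestricted"}:
--         return "禁止绕过 PowerShell 执行策略"
--     if command == "schtasks" and any(arg.lower() == "/create" for arg in args):
--         return "禁止创建计划任务（常见持久化手法）"
--     if command == "wevtutil" and args and args[0].lower() in {"cl", "clear-log"}: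
--         return "禁止清除 Windows 事件日志（T1070.001）"
--     if command == "sc" and args and args[0].lower() in {"create", "config", "delete"}:
--         return "禁止创建或修改 Windows 服务（常见持久化手法）"
--     if command == "certutil" and any(arg.lower() == "-urlcache" for arg in args):
--         return "禁止通过 certutil 下载远程文件（LOL-bin）"
--     if command == "mshta":
--         return "禁止通过 mshta 执行 HTA 文件（LOL-bin）"
--     if command == "rundll32":
--         return "禁止通过 rundll32 执行任意 DLL（LOL-bin）"
--     if command == "regsvr32":
--         return "禁止通过 regsvr32 执行脚本（squiblydoo LOL-bin）"
--     if command in {"wscript", "cscript"}: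
--         return "禁止通过 wscript/cscript 执行脚本（LOL-bin）"
--     if command in {"set-mppreference", "add-mppreference"} and any(
--         "disable" in arg.lower() or "exclusion" in arg.lower() for arg in args
--     ):
--         return "禁止通过 PowerShell 禁用 Windows Defender 或添加 AV 排除项"
--     return None
-- ===== SOURCE B (Python) =====
-- # Declarative rule table: each rule is a plain data record
-- # (commands, per-position first-arg requirements, tokens that must all appear,
-- #  tokens one of which must appear after the prefix, substrings one of which
-- #  must appear in some arg, message), interpreted by ONE generic matcher.
-- _RULES = [
--     ({"shutdown", "restart-computer"}, (), frozenset(), frozenset(), frozenset(),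
--      "禁止主机关机或重启"),
--     ({"net"}, (frozenset({"user"}),), frozenset(), frozenset(), frozenset(),
--      "禁止管理系统用户账户"),
--     ({"net"}, (frozenset({"localgroup"}),), frozenset(), frozenset({"/add"}), frozenset(),
--      "禁止将用户添加到本地组（可用于提权）"),
--     ({"reg"}, (frozenset({"delete", "add", "import", "export"}),), frozenset(), frozenset(), frozenset(),
--      "禁止修改或导出注册表"),
--     ({"vssadmin"}, (frozenset({"delete"}), frozenset({"shadows"})), frozenset(), frozenset(), frozenset(),
--      "禁止删除卷影副本（防范勒索软件）"),
--     ({"wmic"}, (), frozenset({"shadowcopy", "delete"}), frozenset(), frozenset(),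
--      "禁止通过 wmic 删除卷影副本（防范勒索软件）"),
--     ({"set-executionpolicy"}, (frozenset({"bypass", "unrestricted"}),), frozenset(), frozenset(), frozenset(),
--      "禁止绕过 PowerShell 执行策略"),
--     ({"schtasks"}, (), frozenset(), frozenset({"/create"}), frozenset(),
--      "禁止创建计划任务（常见持久化手法）"),
--     ({"wevtutil"}, (frozenset({"cl", "clear-log"}),), frozenset(), frozenset(), frozenset(),
--      "禁止清除 Windows 事件日志（T1070.001）"),
--     ({"sc"}, (frozenset({"create", "config", "delete"}),), frozenset(), frozenset(), frozenset(),
--      "禁止创建或修改 Windows 服务（常见持久化手法）"),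
--     ({"certutil"}, (), frozenset(), frozenset({"-urlcache"}), frozenset(),
--      "禁止通过 certutil 下载远程文件（LOL-bin）"),
--     ({"mshta"}, (), frozenset(), frozenset(), frozenset(),
--      "禁止通过 mshta 执行 HTA 文件（LOL-bin）"),
--     ({"rundll32"}, (), frozenset(), frozenset(), frozenset(),
--      "禁止通过 rundll32 执行任意 DLL（LOL-bin）"),
--     ({"regsvr32"}, (), frozenset(), frozenset(), frozenset(),
--      "禁止通过 regsvr32 执行脚本（squiblydoo LOL-bin）"),
--     ({"wscript", "cscript"}, (), frozenset(), frozenset(), frozenset(),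
--      "禁止通过 wscript/cscript 执行脚本（LOL-bin）"),
--     ({"set-mppreference", "add-mppreference"}, (), frozenset(), frozenset(),
--      frozenset({"disable", "exclusion"}),
--      "禁止通过 PowerShell 禁用 Windows Defender 或添加 AV 排除项"),
-- ]
--
--
-- def _match_windows_segment_command(command: str, args: list[str]) -> str | None:
--     low = [a.lower() for a in args]
--     for cmds, prefix, need_all, tail_any, any_sub, msg in _RULES:
--         if (command in cmds
--                 and len(low) >= len(prefix)
--                 and all(a in allowed for a, allowed in zip(low, prefix))
--                 and all(t in low for t in need_all)
--                 and (not tail_any or any(a in tail_any for a in low[len(prefix):]))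
--                 and (not any_sub or any(s in a for a in low for s in any_sub))):
--             return msg
--     return None
-- ===== Notes on version B (the rewrite author's own statement) =====
-- stated objective: alternative
-- what changed: Replaced A's hand-written chain of per-command boolean conditions by a declarative table of rule records (commands, first-arg prefix sets, must-all tokens, tail-any tokens, substring-any tokens, message) interpreted by one generic matcher over the once-lowercased args; the first matching record's message wins.
import Mathlib
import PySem

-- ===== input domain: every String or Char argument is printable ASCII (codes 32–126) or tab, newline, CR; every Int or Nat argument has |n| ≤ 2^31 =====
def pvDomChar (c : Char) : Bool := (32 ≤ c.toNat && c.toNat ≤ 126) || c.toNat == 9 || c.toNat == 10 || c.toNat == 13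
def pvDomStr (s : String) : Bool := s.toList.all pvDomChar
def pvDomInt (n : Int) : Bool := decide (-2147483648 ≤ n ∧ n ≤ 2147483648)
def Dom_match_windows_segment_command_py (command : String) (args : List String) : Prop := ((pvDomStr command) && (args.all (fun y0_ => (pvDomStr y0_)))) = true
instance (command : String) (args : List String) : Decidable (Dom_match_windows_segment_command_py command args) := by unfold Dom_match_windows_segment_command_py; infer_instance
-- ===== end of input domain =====

-- B replaces A's hand-written chain of per-command conditions by a declarative table of
-- rule RECORDS (commands / first-arg prefix sets / must-all tokens / tail-any tokens /
-- substring-any tokens / message) interpreted by one generic matcher over the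
-- once-lowercased args (objective: alternative).

-- ===== PORT A =====
-- literal transliteration of A's if-chain; args[0]/args[1] are only read under the
-- len guards, so pyGetD is exact there; args[1:] is PySem.List.slice.
def match_windows_segment_command_py (command : String) (args : List String) : Option String :=
  if command == "shutdown" || command == "restart-computer" then
    some "禁止主机关机或重启"
  else if command == "net" && decide (1 ≤ args.length)
      && (PySem.Str.lower (PySem.List.pyGetD args 0 "") == "user") then
    some "禁止管理系统用户账户"
  else if command == "net" && decide (2 ≤ args.length)
      && (PySem.Str.lower (PySem.List.pyGetD args 0 "") == "localgroup")
      && (PySem.List.slice args (some 1) none).any (fun arg => PySem.Str.lower arg == "/add") then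
    some "禁止将用户添加到本地组（可用于提权）"
  else if command == "reg" && !args.isEmpty
      && (let a0 := PySem.Str.lower (PySem.List.pyGetD args 0 "")
          a0 == "delete" || a0 == "add" || a0 == "import" || a0 == "export") then
    some "禁止修改或导出注册表"
  else if command == "vssadmin" && decide (2 ≤ args.length)
      && (PySem.Str.lower (PySem.List.pyGetD args 0 "") == "delete")
      && (PySem.Str.lower (PySem.List.pyGetD args 1 "") == "shadows") then
    some "禁止删除卷影副本（防范勒索软件）"
  else if command == "wmic"
      && (args.map (fun arg => PySem.Str.lower arg)).contains "shadowcopy"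
      && (args.map (fun arg => PySem.Str.lower arg)).contains "delete" then
    some "禁止通过 wmic 删除卷影副本（防范勒索软件）"
  else if command == "set-executionpolicy" && !args.isEmpty
      && (let a0 := PySem.Str.lower (PySem.List.pyGetD args 0 "")
          a0 == "bypass" || a0 == "unrestricted") then
    some "禁止绕过 PowerShell 执行策略"
  else if command == "schtasks" && args.any (fun arg => PySem.Str.lower arg == "/create") then
    some "禁止创建计划任务（常见持久化手法）"
  else if command == "wevtutil" && !args.isEmpty
      && (let a0 := PySem.Str.lower (PySem.List.pyGetD args 0 "")
          a0 == "cl" || a0 == "clear-log") then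
    some "禁止清除 Windows 事件日志（T1070.001）"
  else if command == "sc" && !args.isEmpty
      && (let a0 := PySem.Str.lower (PySem.List.pyGetD args 0 "")
          a0 == "create" || a0 == "config" || a0 == "delete") then
    some "禁止创建或修改 Windows 服务（常见持久化手法）"
  else if command == "certutil" && args.any (fun arg => PySem.Str.lower arg == "-urlcache") then
    some "禁止通过 certutil 下载远程文件（LOL-bin）"
  else if command == "mshta" then
    some "禁止通过 mshta 执行 HTA 文件（LOL-bin）"
  else if command == "rundll32" then
    some "禁止通过 rundll32 执行任意 DLL（LOL-bin）"
  else if command == "regsvr32" then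
    some "禁止通过 regsvr32 执行脚本（squiblydoo LOL-bin）"
  else if command == "wscript" || command == "cscript" then
    some "禁止通过 wscript/cscript 执行脚本（LOL-bin）"
  else if (command == "set-mppreference" || command == "add-mppreference")
      && args.any (fun arg =>
           PySem.Str.isIn "disable" (PySem.Str.lower arg)
           || PySem.Str.isIn "exclusion" (PySem.Str.lower arg)) then
    some "禁止通过 PowerShell 禁用 Windows Defender 或添加 AV 排除项"
  else
    none

-- ===== PORT B =====
-- Source B's rule record: plain data, no code.  Python's frozensets of short literal
-- strings are carried as the lists of their distinct elements (membership only).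
structure PvWinRule where
  cmds    : List String               -- commands this rule applies to
  pfx     : List (List String)        -- allowed (lowercased) values at positions 0,1,…
  needAll : List String               -- tokens that must all occur among lowered args
  tailAny : List String               -- some lowered arg after the prefix equals one of these
  anySub  : List String               -- some lowered arg contains one of these substrings
  msg     : String
  deriving Repr, DecidableEq

def pvWinRules : List PvWinRule :=
  [ ⟨["shutdown", "restart-computer"], [], [], [], [], "禁止主机关机或重启"⟩,
    ⟨["net"], [["user"]], [], [], [], "禁止管理系统用户账户"⟩,
    ⟨["net"], [["localgroup"]], [], ["/add"], [], "禁止将用户添加到本地组（可用于提权）"⟩,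
    ⟨["reg"], [["delete", "add", "import", "export"]], [], [], [], "禁止修改或导出注册表"⟩,
    ⟨["vssadmin"], [["delete"], ["shadows"]], [], [], [], "禁止删除卷影副本（防范勒索软件）"⟩,
    ⟨["wmic"], [], ["shadowcopy", "delete"], [], [], "禁止通过 wmic 删除卷影副本（防范勒索软件）"⟩,
    ⟨["set-executionpolicy"], [["bypass", "unrestricted"]], [], [], [], "禁止绕过 PowerShell 执行策略"⟩,
    ⟨["schtasks"], [], [], ["/create"], [], "禁止创建计划任务（常见持久化手法）"⟩,
    ⟨["wevtutil"], [["cl", "clear-log"]], [], [], [], "禁止清除 Windows 事件日志（T1070.001）"⟩,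
    ⟨["sc"], [["create", "config", "delete"]], [], [], [], "禁止创建或修改 Windows 服务（常见持久化手法）"⟩,
    ⟨["certutil"], [], [], ["-urlcache"], [], "禁止通过 certutil 下载远程文件（LOL-bin）"⟩,
    ⟨["mshta"], [], [], [], [], "禁止通过 mshta 执行 HTA 文件（LOL-bin）"⟩,
    ⟨["rundll32"], [], [], [], [], "禁止通过 rundll32 执行任意 DLL（LOL-bin）"⟩,
    ⟨["regsvr32"], [], [], [], [], "禁止通过 regsvr32 执行脚本（squiblydoo LOL-bin）"⟩,
    ⟨["wscript", "cscript"], [], [], [], [], "禁止通过 wscript/cscript 执行脚本（LOL-bin）"⟩,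
    ⟨["set-mppreference", "add-mppreference"], [], [], [], ["disable", "exclusion"],
      "禁止通过 PowerShell 禁用 Windows Defender 或添加 AV 排除项"⟩ ]

-- Source B's generic matcher over one rule record (low = args already lowercased).
def pvRuleMatches (command : String) (low : List String) (r : PvWinRule) : Bool :=
  r.cmds.contains command
  && decide (r.pfx.length ≤ low.length)
  && (low.zip r.pfx).all (fun p => p.2.contains p.1)
  && r.needAll.all (fun t => low.contains t)
  && (r.tailAny.isEmpty || (low.drop r.pfx.length).any (fun a => r.tailAny.contains a))
  && (r.anySub.isEmpty || low.any (fun a => r.anySub.any (fun s => PySem.Str.isIn s a)))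

-- Source B's loop: the first rule the matcher accepts wins.
def pvFirstMatch (command : String) (low : List String) : List PvWinRule → Option String
  | [] => none
  | r :: rest => if pvRuleMatches command low r then some r.msg else pvFirstMatch command low rest

def match_windows_segment_command_py_alt (command : String) (args : List String) : Option String :=
  pvFirstMatch command (args.map (fun a => PySem.Str.lower a)) pvWinRules

-- ===== PRECONDITION & SPEC =====
def Spec_match_windows_segment_command_py (command : String) (args : List String) (out : Option String) : Prop := out = match_windows_segment_command_py_alt command args
instance (command : String) (args : List String) (out : Option String) : Decidable (Spec_match_windows_segment_command_py command args out) := by unfold Spec_match_windows_segment_command_py; infer_instance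

-- ===== CLAIM (what is proved, stated in full; the proofs are below) =====
def Claim_equal_match_windows_segment_command_py : Prop := ∀ (command : String) (args : List String), Dom_match_windows_segment_command_py command args → Spec_match_windows_segment_command_py command args (match_windows_segment_command_py command args)

-- ===== LEMMAS AND PROOFS =====

-- ===== VERDICT (by name: the statement is the Claim_ definition above) =====
theorem match_windows_segment_command_py_spec : Claim_equal_match_windows_segment_command_py := by
  intro command args _
  unfold Spec_match_windows_segment_command_py match_windows_segment_command_py match_windows_segment_command_py_alt
  by_cases h0 : command = "shutdown"
  · simp [h0, pvWinRules, pvFirstMatch, pvRuleMatches]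
  by_cases h1 : command = "restart-computer"
  · simp [h1, pvWinRules, pvFirstMatch, pvRuleMatches]
  by_cases h2 : command = "net"
  · subst h2
    rcases args with _ | ⟨a, _ | ⟨b, t⟩⟩ <;>
      simp [pvWinRules, pvFirstMatch, pvRuleMatches, List.any_map, PySem.List.slice_from_one]
  by_cases h3 : command = "reg"
  · subst h3
    rcases args with _ | ⟨a, t⟩ <;>
      simp [pvWinRules, pvFirstMatch, pvRuleMatches, or_assoc]
  by_cases h4 : command = "vssadmin"
  · subst h4
    rcases args with _ | ⟨a, _ | ⟨b, t⟩⟩ <;>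
      simp [pvWinRules, pvFirstMatch, pvRuleMatches, PySem.List.pyGetD]
  by_cases h5 : command = "wmic"
  · simp [h5, pvWinRules, pvFirstMatch, pvRuleMatches, List.any_map]
  by_cases h6 : command = "set-executionpolicy"
  · subst h6
    rcases args with _ | ⟨a, t⟩ <;>
      simp [pvWinRules, pvFirstMatch, pvRuleMatches]
  by_cases h7 : command = "schtasks"
  · simp [h7, pvWinRules, pvFirstMatch, pvRuleMatches, List.any_map]
  by_cases h8 : command = "wevtutil"
  · subst h8
    rcases args with _ | ⟨a, t⟩ <;>
      simp [pvWinRules, pvFirstMatch, pvRuleMatches]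
  by_cases h9 : command = "sc"
  · subst h9
    rcases args with _ | ⟨a, t⟩ <;>
      simp [pvWinRules, pvFirstMatch, pvRuleMatches, or_assoc]
  by_cases h10 : command = "certutil"
  · simp [h10, pvWinRules, pvFirstMatch, pvRuleMatches, List.any_map]
  by_cases h11 : command = "mshta"
  · simp [h11, pvWinRules, pvFirstMatch, pvRuleMatches]
  by_cases h12 : command = "rundll32"
  · simp [h12, pvWinRules, pvFirstMatch, pvRuleMatches]
  by_cases h13 : command = "regsvr32"
  · simp [h13, pvWinRules, pvFirstMatch, pvRuleMatches]
  by_cases h14 : command = "wscript"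
  · simp [h14, pvWinRules, pvFirstMatch, pvRuleMatches]
  by_cases h15 : command = "cscript"
  · simp [h15, pvWinRules, pvFirstMatch, pvRuleMatches]
  by_cases h16 : command = "set-mppreference"
  · simp [h16, pvWinRules, pvFirstMatch, pvRuleMatches, List.any_map]
  by_cases h17 : command = "add-mppreference"
  · simp [h17, pvWinRules, pvFirstMatch, pvRuleMatches, List.any_map]
  · simp [pvWinRules, pvFirstMatch, pvRuleMatches, h0, h1, h2, h3, h4, h5, h6, h7, h8, h9, h10, h11, h12, h13, h14, h15, h16, h17]
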